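-- pv_equiv track=rewrite | github.com/danieleschmidt/retro-peft-adapters | src/retro_peft/serving/advanced_serving.py | _generate_related_keys
-- ===== SOURCE A (Python) =====
-- from typing import Any, Callable, Dict, List, Optional, Tuple, Union
--
-- def _generate_related_keys(key: str) -> List[str]:
--     """Generate related cache keys for prefetching."""
--     # Simple related key generation - would be more sophisticated
--     related = []
--     if ":" in key:
--         parts = key.split(":")
--         for i, part in enumerate(parts):
--             if i > 0:
--                 related.append(":".join(parts[:i] + ["*"]))
--     return related[:3]  # Limit to avoid explosion
-- ===== SOURCE B (Python) =====
-- def _generate_related_keys(key):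
--     """Generate related cache keys for prefetching."""
--     related = []
--     if ":" not in key:
--         return related
--     parts = key.split(":")
--     prefix = [parts[0]]
--     for part in parts[1:]:
--         related.append(":".join(prefix + ["*"]))
--         if len(related) == 3:
--             break
--         prefix.append(part)
--     return related
-- ===== Notes on version B (the rewrite author's own statement) =====
-- stated objective: alternative
-- what changed: Replaces the enumerate loop with repeated parts[:i] slicing plus a final [:3] truncation by a single pass over parts[1:] that maintains a growing prefix accumulator, emits ':'.join(prefix+['*']) before extending it, and breaks early once three keys are collected.
import Mathlib
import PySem

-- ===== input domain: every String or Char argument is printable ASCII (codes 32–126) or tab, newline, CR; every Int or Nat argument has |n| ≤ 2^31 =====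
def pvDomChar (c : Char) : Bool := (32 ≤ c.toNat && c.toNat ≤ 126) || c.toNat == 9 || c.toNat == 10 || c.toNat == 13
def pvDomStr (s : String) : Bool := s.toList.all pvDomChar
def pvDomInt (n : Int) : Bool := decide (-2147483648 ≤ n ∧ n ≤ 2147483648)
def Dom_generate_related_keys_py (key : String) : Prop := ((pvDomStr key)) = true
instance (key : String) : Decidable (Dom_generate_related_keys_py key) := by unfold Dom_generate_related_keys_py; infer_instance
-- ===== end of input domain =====

-- B replaces A's per-index slicing and final [:3] truncation by a single accumulator-passing
-- pass with early exit after three keys; same return value (alternative decomposition).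

-- ===== PORT A =====
def generate_related_keys_py (key : String) : List String :=
  let related : List String :=
    if PySem.Str.isIn ":" key then
      let parts := ((PySem.Str.split? key ":").getD [])
      (PySem.List.enumerate parts 0).foldl
        (fun acc p =>
          if p.1 > 0 then
            acc ++ [PySem.Str.join ":" (PySem.List.slice parts none (some p.1) ++ ["*"])]
          else acc)
        []
    else []
  PySem.List.slice related none (some 3)

-- ===== PORT B =====
def generate_related_keys_py_alt_go (pre : List String) (rest : List String)
    (related : List String) : List String :=
  match rest with
  | [] => related
  | part :: rest' =>
      let related' := related ++ [PySem.Str.join ":" (pre ++ ["*"])]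
      if related'.length == 3 then related'
      else generate_related_keys_py_alt_go (pre ++ [part]) rest' related'

def generate_related_keys_py_alt (key : String) : List String :=
  if PySem.Str.isIn ":" key then
    match ((PySem.Str.split? key ":").getD []) with
    | [] => []
    | p0 :: rest => generate_related_keys_py_alt_go [p0] rest []
  else []

-- ===== PRECONDITION & SPEC =====
def Spec_generate_related_keys_py (key : String) (out : List String) : Prop := out = generate_related_keys_py_alt key
instance (key : String) (out : List String) : Decidable (Spec_generate_related_keys_py key out) := by unfold Spec_generate_related_keys_py; infer_instance

-- ===== CLAIM (what is proved, stated in full; the proofs are below) =====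
def Claim_equal_generate_related_keys_py : Prop := ∀ (key : String), Dom_generate_related_keys_py key → Spec_generate_related_keys_py key (generate_related_keys_py key)

-- ===== LEMMAS AND PROOFS =====

/-- The full (untruncated) emitted list, shared characterisation of both loops. -/
def pvEmit (pre : List String) : List String → List String
  | [] => []
  | part :: rest => PySem.Str.join ":" (pre ++ ["*"]) :: pvEmit (pre ++ [part]) rest

lemma altGo_eq_emit (rest : List String) : ∀ (pre acc : List String), acc.length < 3 →
    generate_related_keys_py_alt_go pre rest acc = acc ++ (pvEmit pre rest).take (3 - acc.length) := by
  induction rest with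
  | nil => intro pre acc _; simp [generate_related_keys_py_alt_go, pvEmit]
  | cons part rest ih =>
      intro pre acc h
      simp only [generate_related_keys_py_alt_go, pvEmit]
      by_cases h3 : acc.length = 2
      · have : (acc ++ [PySem.Str.join ":" (pre ++ ["*"])]).length == 3 := by
          simp [List.length_append, h3]
        simp only [this, if_pos]
        have : 3 - acc.length = 1 := by omega
        simp [this]
      · have hlen : (acc ++ [PySem.Str.join ":" (pre ++ ["*"])]).length ≠ 3 := by
          simp [List.length_append]; omega
        simp only [beq_iff_eq, hlen, if_neg, not_false_iff]
        rw [ih (pre ++ [part]) _ (by simp [List.length_append]; omega)]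
        have : 3 - acc.length = (3 - (acc.length + 1)) + 1 := by omega
        simp [List.length_append, this, List.take_succ_cons]

lemma A_loop_eq_emit (parts : List String) (rest : List String) : ∀ (pre acc : List String),
    pre ++ rest = parts → 0 < pre.length →
    (PySem.List.enumerate rest (pre.length : Int)).foldl
      (fun acc p =>
        if p.1 > 0 then
          acc ++ [PySem.Str.join ":" (PySem.List.slice parts none (some p.1) ++ ["*"])]
        else acc) acc
    = acc ++ pvEmit pre rest := by
  induction rest with
  | nil => intro pre acc _ _; simp [PySem.List.enumerate, pvEmit]
  | cons part rest ih =>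
      intro pre acc hparts hpos
      rw [PySem.List.enumerate_cons]
      simp only [List.foldl_cons]
      have hgt : ((pre.length : Int) > 0) := by exact_mod_cast hpos
      rw [if_pos hgt]
      have hslice : PySem.List.slice parts none (some ((pre.length : Nat) : Int)) = pre := by
        rw [PySem.List.slice_to_natCast, ← hparts, List.take_left]
      have hcast : (pre.length : Int) + 1 = (((pre ++ [part]).length : Nat) : Int) := by
        simp [List.length_append]
      rw [hslice, hcast, ih (pre ++ [part]) _ (by simp [← hparts]) (by simp [List.length_append])]
      simp [pvEmit]

-- ===== VERDICT (by name: the statement is the Claim_ definition above) =====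
theorem generate_related_keys_py_spec : Claim_equal_generate_related_keys_py := by
  unfold Claim_equal_generate_related_keys_py Spec_generate_related_keys_py
  intro key _
  unfold generate_related_keys_py generate_related_keys_py_alt
  by_cases h : PySem.Str.isIn ":" key = true
  · simp only [h, if_pos]
    cases hsplit : ((PySem.Str.split? key ":").getD []) with
    | nil => simp [PySem.List.enumerate, PySem.List.slice]
    | cons p0 rest =>
        rw [PySem.List.enumerate_cons]
        simp only [List.foldl_cons]
        have h0 : ¬ ((0 : Int) > 0) := by omega
        rw [if_neg h0]
        have h1 : ((0 : Int) + 1) = ((([p0] : List String).length : Nat) : Int) := by simp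
        rw [h1, A_loop_eq_emit (p0 :: rest) rest [p0] [] (by simp) (by simp)]
        rw [altGo_eq_emit rest [p0] [] (by simp)]
        have : PySem.List.slice ([] ++ pvEmit [p0] rest) none (some 3)
            = (pvEmit [p0] rest).take 3 := by
          rw [List.nil_append, PySem.List.slice_to _ (by omega : (0:Int) ≤ 3)]
          rfl
        simpa using this
  · simp only [h]
    simp [PySem.List.slice]
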